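-- pv_equiv track=rewrite | github.com/stolostron/multicluster-global-hub | .github/scripts/auto_review.py | parse_diff_lines
-- ===== SOURCE A (Python) =====
-- from typing import List, Dict, Set, Optional, Tuple
--
-- def parse_diff_lines(patch: str) -> Set[int]:
--     """Parse diff patch to extract line numbers that can receive comments"""
--     if not patch:
--         return set()
--
--     valid_lines = set()
--     current_line = 0
--
--     for line in patch.split('\n'):
--         if line.startswith('@@'):
--             # Parse hunk header: @@ -old_start,old_count +new_start,new_count @@
--             parts = line.split()
--             if len(parts) >= 3:
--                 new_info = parts[2]  # +new_start,new_count
--                 if new_info.startswith('+'):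
--                     current_line = int(new_info[1:].split(',')[0]) - 1
--         elif line.startswith('+'):
--             # Added line - valid for comments
--             current_line += 1
--             valid_lines.add(current_line)
--         elif line.startswith('-'):
--             # Removed line - skip (don't increment current_line)
--             pass
--         elif line.startswith(' '):
--             # Context line - valid for comments
--             current_line += 1
--             valid_lines.add(current_line)
--
--     return valid_lines
-- ===== SOURCE B (Python) =====
-- def _split_hunks(lines):
--     """Split the diff lines into (header_or_None, body_lines) chunks, in order."""
--     chunks = []
--     header = None
--     body = []
--     for line in lines:
--         if line.startswith('@@'):
--             chunks.append((header, body))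
--             header, body = line, []
--         else:
--             body.append(line)
--     chunks.append((header, body))
--     return chunks
--
--
-- def _hunk_start(header, pos):
--     parts = header.split()
--     if len(parts) >= 3 and parts[2].startswith('+'):
--         return int(parts[2][1:].split(',')[0]) - 1
--     return pos
--
--
-- def parse_diff_lines(patch: str):
--     """Parse diff patch to extract line numbers that can receive comments"""
--     if not patch:
--         return set()
--     valid_lines = set()
--     pos = 0
--     for header, body in _split_hunks(patch.split('\n')):
--         if header is not None:
--             pos = _hunk_start(header, pos)
--         n = sum(1 for l in body if l.startswith('+') or l.startswith(' '))
--         valid_lines.update(range(pos + 1, pos + 1 + n))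
--         pos += n
--     return valid_lines
-- ===== Notes on version B (the rewrite author's own statement) =====
-- stated objective: alternative
-- what changed: B first splits the diff into (header, body) hunks, parses each header once, counts the body lines that are added or context, and adds each hunk's commentable line numbers as one consecutive range, instead of A's per-line running counter with element-by-element set inserts.
import Mathlib
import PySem

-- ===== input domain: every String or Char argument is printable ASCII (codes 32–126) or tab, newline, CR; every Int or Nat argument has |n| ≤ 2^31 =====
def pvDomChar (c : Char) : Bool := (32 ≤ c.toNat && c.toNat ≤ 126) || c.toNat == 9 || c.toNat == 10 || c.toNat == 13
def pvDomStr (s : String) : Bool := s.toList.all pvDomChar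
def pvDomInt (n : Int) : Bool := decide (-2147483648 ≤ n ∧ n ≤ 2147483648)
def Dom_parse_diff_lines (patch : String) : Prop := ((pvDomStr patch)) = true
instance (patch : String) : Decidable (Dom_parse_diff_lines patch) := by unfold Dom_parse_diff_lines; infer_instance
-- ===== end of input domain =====

-- B groups the diff into (header, body) hunks first and adds each hunk's kept lines as one
-- consecutive range, instead of A's per-line counter; objective: alternative decomposition.
-- A returns a Python set; per the type convention both ports return its distinct elements as a List Int.

-- ===== PORT A =====
-- the int(new_info[1:].split(',')[0]) of A; `.getD 0` is only reached outside Pre_ (A raises ValueError there)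
def pdlAStep (st : PySem.Set Int × Int) (line : List Char) : PySem.Set Int × Int :=
  if PySem.Chars.startswith line ['@', '@'] then
    let parts := PySem.Chars.split₀ line
    if 3 ≤ parts.length then
      let newInfo := parts.getD 2 []
      if PySem.Chars.startswith newInfo ['+'] then
        (st.1, ((PySem.Int.ofChars? ((PySem.Chars.splitOn (newInfo.drop 1) [',']).headD [])).getD 0) - 1)
      else st
    else st
  else if PySem.Chars.startswith line ['+'] then
    (PySem.Set.add st.1 (st.2 + 1), st.2 + 1)
  else if PySem.Chars.startswith line ['-'] then
    st
  else if PySem.Chars.startswith line [' '] then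
    (PySem.Set.add st.1 (st.2 + 1), st.2 + 1)
  else st

def parse_diff_lines (patch : String) : List Int :=
  if patch.toList.isEmpty then []
  else ((PySem.Chars.splitOn patch.toList ['\n']).foldl pdlAStep (PySem.Set.empty, 0)).1

-- ===== PORT B =====
-- _split_hunks: one pass appending to the open chunk, flushed at each header and at the end
def pdlSplitHunks (lines : List (List Char)) : List (Option (List Char) × List (List Char)) :=
  let st := lines.foldl
    (fun (st : List (Option (List Char) × List (List Char)) × Option (List Char) × List (List Char)) line =>
      if PySem.Chars.startswith line ['@', '@'] then
        (st.1 ++ [(st.2.1, st.2.2)], some line, [])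
      else (st.1, st.2.1, st.2.2 ++ [line]))
    ([], none, [])
  st.1 ++ [(st.2.1, st.2.2)]

-- _hunk_start; same `.getD 0` totalisation as port A, only reached outside Pre_
def pdlHunkStart (header : List Char) (pos : Int) : Int :=
  let parts := PySem.Chars.split₀ header
  if decide (3 ≤ parts.length) && PySem.Chars.startswith (parts.getD 2 []) ['+'] then
    ((PySem.Int.ofChars? ((PySem.Chars.splitOn ((parts.getD 2 []).drop 1) [',']).headD [])).getD 0) - 1
  else pos

def pdlChunkStep (st : PySem.Set Int × Int) (chunk : Option (List Char) × List (List Char)) :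
    PySem.Set Int × Int :=
  let pos : Int :=
    match chunk.1 with
    | some h => pdlHunkStart h st.2
    | none => st.2
  let n : Int :=
    (chunk.2.countP (fun l => PySem.Chars.startswith l ['+'] || PySem.Chars.startswith l [' ']) : Nat)
  (PySem.Set.update st.1 (PySem.List.pyRange (pos + 1) (pos + 1 + n) 1), pos + n)

def parse_diff_lines_alt (patch : String) : List Int :=
  if patch.toList.isEmpty then []
  else ((pdlSplitHunks (PySem.Chars.splitOn patch.toList ['\n'])).foldl pdlChunkStep (PySem.Set.empty, 0)).1

-- ===== PRECONDITION & SPEC =====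
-- Pre_ excludes patches containing a hunk header "@@ …" whose third whitespace token starts with '+'
-- but whose text after the '+' (up to the first ',') is not a valid int literal: A raises ValueError there.
def Pre_parse_diff_lines (patch : String) : Prop :=
  ∀ line ∈ PySem.Chars.splitOn patch.toList ['\n'],
    PySem.Chars.startswith line ['@', '@'] = true →
    3 ≤ (PySem.Chars.split₀ line).length →
    PySem.Chars.startswith ((PySem.Chars.split₀ line).getD 2 []) ['+'] = true →
    (PySem.Int.ofChars?
      ((PySem.Chars.splitOn (((PySem.Chars.split₀ line).getD 2 []).drop 1) [',']).headD [])).isSome = true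
instance (patch : String) : Decidable (Pre_parse_diff_lines patch) := by
  unfold Pre_parse_diff_lines; infer_instance

def pvWitness_parse_diff_lines : String := "@@ -1,2 +3,4 @@\n+new line\n context\n-old line"

def Spec_parse_diff_lines (patch : String) (out : List Int) : Prop := out = parse_diff_lines_alt patch
instance (patch : String) (out : List Int) : Decidable (Spec_parse_diff_lines patch out) := by
  unfold Spec_parse_diff_lines; infer_instance

-- ===== CLAIM (what is proved, stated in full; the proofs are below) =====
def Claim_equal_parse_diff_lines : Prop := ∀ (patch : String), Dom_parse_diff_lines patch → Pre_parse_diff_lines patch → Spec_parse_diff_lines patch (parse_diff_lines patch)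

-- ===== LEMMAS AND PROOFS =====

-- recursive characterisation of _split_hunks's grouping
def pdlShRec (h : Option (List Char)) (b : List (List Char)) :
    List (List Char) → List (Option (List Char) × List (List Char))
  | [] => [(h, b)]
  | l :: rest =>
    if PySem.Chars.startswith l ['@', '@'] then (h, b) :: pdlShRec (some l) [] rest
    else pdlShRec h (b ++ [l]) rest

theorem pdlSplitHunks_go (lines : List (List Char)) :
    ∀ (chunks : List (Option (List Char) × List (List Char))) (h : Option (List Char))
      (b : List (List Char)),
      (let st := lines.foldl
        (fun (st : List (Option (List Char) × List (List Char)) × Option (List Char) × List (List Char)) line =>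
          if PySem.Chars.startswith line ['@', '@'] then
            (st.1 ++ [(st.2.1, st.2.2)], some line, [])
          else (st.1, st.2.1, st.2.2 ++ [line]))
        (chunks, h, b)
       st.1 ++ [(st.2.1, st.2.2)]) = chunks ++ pdlShRec h b lines := by
  induction lines with
  | nil => intro chunks h b; simp [pdlShRec]
  | cons l rest ih =>
    intro chunks h b
    by_cases hl : PySem.Chars.startswith l ['@', '@'] = true
    · simp only [List.foldl_cons, hl, if_pos, pdlShRec]
      rw [ih]; simp [hl, pdlShRec]
    · simp only [List.foldl_cons, pdlShRec, hl]
      rw [if_neg (by simp [hl]), ih]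
      simp [hl, pdlShRec]

theorem pdlSplitHunks_eq (lines : List (List Char)) :
    pdlSplitHunks lines = pdlShRec none [] lines := by
  have := pdlSplitHunks_go lines [] none []
  simpa [pdlSplitHunks] using this

-- adding one kept line then a consecutive range equals adding the extended range
theorem pdlKeepStep (valid : PySem.Set Int) (pos : Int) (n : Nat) :
    (PySem.Set.update (PySem.Set.add valid (pos + 1))
        (PySem.List.pyRange (pos + 1 + 1) (pos + 1 + 1 + (n : Int)) 1),
      pos + 1 + (n : Int)) =
    (PySem.Set.update valid (PySem.List.pyRange (pos + 1) (pos + 1 + ((n : Int) + 1)) 1),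
      pos + ((n : Int) + 1)) := by
  have e : pos + 1 + 1 + (n : Int) = pos + 1 + ((n : Int) + 1) := by ring
  have e2 : pos + 1 + (n : Int) = pos + ((n : Int) + 1) := by ring
  rw [e, e2, PySem.List.pyRange_one_cons (by omega : pos + 1 < pos + 1 + ((n : Int) + 1))]
  simp [PySem.Set.update]

-- A's fold over a run of non-header lines adds exactly one consecutive range
theorem pdlBodyFold (b : List (List Char))
    (hb : ∀ l ∈ b, PySem.Chars.startswith l ['@', '@'] = false) :
    ∀ (valid : PySem.Set Int) (pos : Int),
      b.foldl pdlAStep (valid, pos) =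
        (PySem.Set.update valid
          (PySem.List.pyRange (pos + 1)
            (pos + 1 + (b.countP (fun l => PySem.Chars.startswith l ['+'] || PySem.Chars.startswith l [' ']) : Nat)) 1),
         pos + (b.countP (fun l => PySem.Chars.startswith l ['+'] || PySem.Chars.startswith l [' ']) : Nat)) := by
  induction b with
  | nil =>
    intro valid pos
    simp [PySem.Set.update, PySem.List.pyRange]
  | cons l rest ih =>
    intro valid pos
    have hl := hb l (by simp)
    have hrest : ∀ x ∈ rest, PySem.Chars.startswith x ['@', '@'] = false := fun x hx => hb x (by simp [hx])
    by_cases hp : PySem.Chars.startswith l ['+'] = true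
    · have hstep : pdlAStep (valid, pos) l = (PySem.Set.add valid (pos + 1), pos + 1) := by
        simp [pdlAStep, hl, hp]
      have hk : ((l :: rest).countP (fun l => PySem.Chars.startswith l ['+'] || PySem.Chars.startswith l [' ']) : Int)
          = (rest.countP (fun l => PySem.Chars.startswith l ['+'] || PySem.Chars.startswith l [' ']) : Int) + 1 := by
        simp [List.countP_cons, hp]
      rw [List.foldl_cons, hstep, ih hrest, hk]
      exact pdlKeepStep valid pos _
    · by_cases hm : PySem.Chars.startswith l ['-'] = true
      · obtain ⟨t, rfl⟩ := (PySem.Chars.startswith_iff l ['-']).1 hm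
        simp only [List.singleton_append] at hl hp hm hrest ⊢
        have hs : PySem.Chars.startswith ('-' :: t) [' '] = false := by
          simp [PySem.Chars.startswith, List.isPrefixOf]
        have hp' : PySem.Chars.startswith ('-' :: t) ['+'] = false := by
          simp [PySem.Chars.startswith, List.isPrefixOf]
        have hstep : pdlAStep (valid, pos) ('-' :: t) = (valid, pos) := by
          simp [pdlAStep, hl, hp', hm]
        have hk : (('-' :: t) :: rest).countP (fun l => PySem.Chars.startswith l ['+'] || PySem.Chars.startswith l [' '])
            = rest.countP (fun l => PySem.Chars.startswith l ['+'] || PySem.Chars.startswith l [' ']) := by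
          simp [List.countP_cons, hp', hs]
        rw [List.foldl_cons, hstep, ih hrest, hk]
      · by_cases hs : PySem.Chars.startswith l [' '] = true
        · have hstep : pdlAStep (valid, pos) l = (PySem.Set.add valid (pos + 1), pos + 1) := by
            simp [pdlAStep, hl, hp, hm, hs]
          have hk : ((l :: rest).countP (fun l => PySem.Chars.startswith l ['+'] || PySem.Chars.startswith l [' ']) : Int)
              = (rest.countP (fun l => PySem.Chars.startswith l ['+'] || PySem.Chars.startswith l [' ']) : Int) + 1 := by
            simp [List.countP_cons, hp, hs]
          rw [List.foldl_cons, hstep, ih hrest, hk]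
          exact pdlKeepStep valid pos _
        · have hstep : pdlAStep (valid, pos) l = (valid, pos) := by
            simp [pdlAStep, hl, hp, hm, hs]
          have hk : (l :: rest).countP (fun l => PySem.Chars.startswith l ['+'] || PySem.Chars.startswith l [' '])
              = rest.countP (fun l => PySem.Chars.startswith l ['+'] || PySem.Chars.startswith l [' ']) := by
            simp [List.countP_cons, hp, hs]
          rw [List.foldl_cons, hstep, ih hrest, hk]

-- A's step on a hunk-header line is exactly _hunk_start on the position
theorem pdlAStep_header (l : List Char) (st : PySem.Set Int × Int)
    (hl : PySem.Chars.startswith l ['@', '@'] = true) :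
    pdlAStep st l = (st.1, pdlHunkStart l st.2) := by
  by_cases h3 : 3 ≤ (PySem.Chars.split₀ l).length
  · by_cases hpl : PySem.Chars.startswith ((PySem.Chars.split₀ l).getD 2 []) ['+'] = true
    all_goals simp only [List.getD_eq_getElem?_getD] at hpl
    · simp [pdlAStep, pdlHunkStart, List.getD_eq_getElem?_getD, hl, h3, hpl]
    · simp [pdlAStep, pdlHunkStart, List.getD_eq_getElem?_getD, hl, h3, hpl]
  · simp [pdlAStep, pdlHunkStart, List.getD_eq_getElem?_getD, hl, h3]

def pdlApplyHeader (h : Option (List Char)) (st : PySem.Set Int × Int) : PySem.Set Int × Int :=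
 match h with
 | some hl => (st.1, pdlHunkStart hl st.2)
 | none => st

-- fused grouping: B's fold over the chunks of `lines` equals A's fold over `lines`
theorem pdlMain (lines : List (List Char)) :
    ∀ (h : Option (List Char)) (b : List (List Char)) (st : PySem.Set Int × Int),
      (∀ l ∈ b, PySem.Chars.startswith l ['@', '@'] = false) →
      (pdlShRec h b lines).foldl pdlChunkStep st =
        lines.foldl pdlAStep (b.foldl pdlAStep (pdlApplyHeader h st)) := by
  induction lines with
  | nil =>
    intro h b st hb
    simp only [pdlShRec, List.foldl_cons, List.foldl_nil]
    rw [pdlBodyFold b hb]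
    cases h with
    | none => simp [pdlChunkStep, pdlApplyHeader]
    | some hl => simp [pdlChunkStep, pdlApplyHeader]
  | cons l rest ih =>
    intro h b st hb
    by_cases hl : PySem.Chars.startswith l ['@', '@'] = true
    · simp only [pdlShRec, hl, if_pos, List.foldl_cons]
      rw [ih (some l) [] (pdlChunkStep st (h, b)) (by simp)]
      have hchunk : pdlChunkStep st (h, b) = b.foldl pdlAStep (pdlApplyHeader h st) := by
        rw [pdlBodyFold b hb]
        cases h with
        | none => simp [pdlChunkStep, pdlApplyHeader]
        | some hh => simp [pdlChunkStep, pdlApplyHeader]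
      rw [hchunk]
      simp only [List.foldl_nil, pdlApplyHeader]
      rw [pdlAStep_header l _ hl]
    · rw [show pdlShRec h b (l :: rest) = pdlShRec h (b ++ [l]) rest from by simp [pdlShRec, hl]]
      rw [ih h (b ++ [l]) st (by intro x hx; rcases List.mem_append.1 hx with h1 | h1
                                 · exact hb x h1
                                 · simp at h1; subst h1; simpa using hl)]
      rw [List.foldl_append]
      simp

-- ===== VERDICT (by name: the statement is the Claim_ definition above) =====
theorem parse_diff_lines_spec : Claim_equal_parse_diff_lines := by
  intro patch _ _
  unfold Spec_parse_diff_lines parse_diff_lines parse_diff_lines_alt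
  by_cases he : patch.toList.isEmpty
  · simp [he]
  · simp only [he, Bool.false_eq_true, if_neg]
    rw [pdlSplitHunks_eq, pdlMain _ none [] (PySem.Set.empty, 0) (by simp)]
    simp [pdlApplyHeader]
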